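-- pv_equiv track=rewrite | github.com/leandrofahur/kotoba-coach-app | backend/app/services/pitch_service.py | derive_pitch_pattern
-- ===== SOURCE A (Python) =====
-- from typing import List, Dict, Tuple, Optional
--
-- def derive_pitch_pattern(accent_type: int, total: int) -> List[str]:
--     """
--     Derive expected pitch pattern based on accent type and total morae.
--     Returns a list of "H" (high) and "L" (low) pitch markers.
--     """
--     if total == 0:
--         return []
--
--     # Japanese pitch starts low, so we start with "L"
--     pattern = ["L"]
--
--     for i in range(1, total):
--         if accent_type == 0:
--             # Flat accent (heiban) - all low
--             pattern.append("L")
--         elif i < accent_type: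
--             # Before accent peak - high
--             pattern.append("H")
--         elif i == accent_type:
--             # At accent peak - low (falling)
--             pattern.append("L")
--         else:
--             # After accent peak - low
--             pattern.append("L")
--
--     return pattern
-- ===== SOURCE B (Python) =====
-- def derive_pitch_pattern(accent_type, total):
--     if total == 0:
--         return []
--     high = max(0, min(accent_type - 1, total - 1))
--     return ["L"] + ["H"] * high + ["L"] * (total - 1 - high)
-- ===== Notes on version B (the rewrite author's own statement) =====
-- stated objective: simpler
-- what changed: B computes the number of high morae as a clamped closed form and builds the pattern by concatenating three runs (['L'] + ['H']*high + ['L']*rest) instead of looping over every mora with accent-type branches; bulk list repetition also makes it measurably faster by a constant factor.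
import Mathlib
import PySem

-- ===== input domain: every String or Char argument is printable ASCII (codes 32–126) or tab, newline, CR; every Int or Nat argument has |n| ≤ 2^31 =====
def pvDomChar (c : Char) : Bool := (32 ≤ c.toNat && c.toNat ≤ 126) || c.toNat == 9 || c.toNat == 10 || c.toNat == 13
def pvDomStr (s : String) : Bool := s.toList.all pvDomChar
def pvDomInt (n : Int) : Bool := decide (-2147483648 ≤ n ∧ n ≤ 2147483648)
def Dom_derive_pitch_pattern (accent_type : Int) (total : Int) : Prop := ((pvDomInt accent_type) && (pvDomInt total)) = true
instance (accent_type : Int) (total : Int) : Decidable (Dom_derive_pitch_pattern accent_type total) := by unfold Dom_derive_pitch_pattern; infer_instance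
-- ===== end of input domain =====

-- B builds the pattern as three concatenated runs from a clamped high-mora count instead of A's per-mora loop; objective: simpler.

-- ===== PORT A =====
def derive_pitch_pattern (accent_type : Int) (total : Int) : List String :=
  if total = 0 then []
  else
    (PySem.List.pyRange 1 total 1).foldl (fun pattern i =>
      if accent_type = 0 then pattern ++ ["L"]
      else if i < accent_type then pattern ++ ["H"]
      else if i = accent_type then pattern ++ ["L"]
      else pattern ++ ["L"]) ["L"]

-- ===== PORT B =====
def derive_pitch_pattern_alt (accent_type : Int) (total : Int) : List String :=
  if total = 0 then []
  else
    let high : Int := max 0 (min (accent_type - 1) (total - 1))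
    ["L"] ++ List.replicate high.toNat "H" ++ List.replicate (total - 1 - high).toNat "L"

-- ===== PRECONDITION & SPEC =====
def Spec_derive_pitch_pattern (accent_type : Int) (total : Int) (out : List String) : Prop := out = derive_pitch_pattern_alt accent_type total
instance (accent_type : Int) (total : Int) (out : List String) : Decidable (Spec_derive_pitch_pattern accent_type total out) := by unfold Spec_derive_pitch_pattern; infer_instance

-- ===== CLAIM (what is proved, stated in full; the proofs are below) =====
def Claim_equal_derive_pitch_pattern : Prop := ∀ (accent_type : Int) (total : Int), Dom_derive_pitch_pattern accent_type total → Spec_derive_pitch_pattern accent_type total (derive_pitch_pattern accent_type total)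

-- ===== LEMMAS AND PROOFS =====

-- closed form of A's fold over range(1, 1+n)
theorem derive_fold_closed (a : Int) (n : Nat) :
    (PySem.List.pyRange 1 (1 + n) 1).foldl (fun pattern i =>
      if a = 0 then pattern ++ ["L"]
      else if i < a then pattern ++ ["H"]
      else if i = a then pattern ++ ["L"]
      else pattern ++ ["L"]) ["L"]
    = ["L"] ++ List.replicate (max 0 (min (a - 1) ((1 + n : Int) - 1))).toNat "H"
            ++ List.replicate (((1 + n : Int) - 1) - max 0 (min (a - 1) ((1 + n : Int) - 1))).toNat "L" := by
  induction n with
  | zero =>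
    rw [show ((1 : Int) + (0 : Nat)) = 1 by norm_num, PySem.List.pyRange_one_eq_nil (by norm_num)]
    simp
  | succ m ih =>
    have hsp : ((1 : Int) + (m + 1 : Nat)) = (1 + m : Int) + 1 := by push_cast; ring
    rw [hsp, PySem.List.pyRange_one_succ_right (by omega), List.foldl_append]
    rw [show ((1 : Int) + (m : Nat)) = (1 + m : Int) by push_cast; ring] at ih
    rw [ih]
    simp only [List.foldl_cons, List.foldl_nil]
    by_cases ha : a = 0
    · subst ha
      simp only [if_pos rfl]
      have h1 : (max 0 (min ((0:Int) - 1) ((1 + (m : Int)) - 1))) = 0 := by omega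
      have h2 : (max 0 (min ((0 : Int) - 1) ((1 + (m : Int)) + 1 - 1))) = 0 := by omega
      rw [h1, h2]
      have h3 : ((1 + (m : Int)) + 1 - 1 - 0).toNat = ((1 + (m : Int)) - 1 - 0).toNat + 1 := by omega
      rw [h3, List.replicate_succ' ]
      simp
    · simp only [if_neg ha]
      by_cases hlt : (1 + (m : Int)) < a
      · -- new element is "H": 1+m ≤ a-1
        simp only [if_pos hlt]
        have e1 : (max 0 (min (a - 1) ((1 + (m : Int)) - 1))) = (1 + (m : Int)) - 1 := by omega
        have e2 : (max 0 (min (a - 1) ((1 + (m : Int)) + 1 - 1))) = (1 + (m : Int)) := by omega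
        rw [e1, e2]
        have e3 : ((1 + (m : Int))).toNat = ((1 + (m : Int)) - 1).toNat + 1 := by omega
        have e4 : ((1 + (m : Int)) - 1 - ((1 + (m : Int)) - 1)).toNat = 0 := by omega
        have e5 : ((1 + (m : Int)) + 1 - 1 - (1 + (m : Int))).toNat = 0 := by omega
        rw [e3, e4, e5, List.replicate_succ']
        simp
      · -- new element is "L" (either i = a or i > a)
        have hh : (max 0 (min (a - 1) ((1 + (m : Int)) + 1 - 1))) = (max 0 (min (a - 1) ((1 + (m : Int)) - 1))) := by omega
        have hc : ((1 + (m : Int)) + 1 - 1 - max 0 (min (a - 1) ((1 + (m : Int)) - 1))).toNat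
                = ((1 + (m : Int)) - 1 - max 0 (min (a - 1) ((1 + (m : Int)) - 1))).toNat + 1 := by omega
        by_cases heq : (1 + (m : Int)) = a
        · simp only [if_neg hlt, if_pos heq, hh, hc, List.replicate_succ']
          simp
        · simp only [if_neg hlt, if_neg heq, hh, hc, List.replicate_succ']
          simp

-- ===== VERDICT (by name: the statement is the Claim_ definition above) =====
theorem derive_pitch_pattern_spec : Claim_equal_derive_pitch_pattern := by
  intro a t _
  unfold Spec_derive_pitch_pattern derive_pitch_pattern derive_pitch_pattern_alt
  by_cases ht : t = 0
  · simp [ht]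
  · simp only [if_neg ht]
    by_cases hpos : 1 ≤ t
    · obtain ⟨n, hn⟩ : ∃ n : Nat, t = 1 + (n : Int) := ⟨(t - 1).toNat, by omega⟩
      subst hn
      exact derive_fold_closed a n
    · -- t < 0: loop body never runs, both sides are ["L"]
      rw [PySem.List.pyRange_one_eq_nil (by omega)]
      have h1 : (max 0 (min (a - 1) (t - 1))) = 0 := by omega
      have h2 : (t - 1 - max 0 (min (a - 1) (t - 1))).toNat = 0 := by omega
      simp [h1, h2]
      omega
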